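-- pv_equiv track=rewrite | github.com/yonsweng/ps | atcoder/arc121/b.py | f
-- ===== SOURCE A (Python) =====
-- import bisect
--
-- def f(A, B, C):
--     A = sorted(A)  # odd
--     B = sorted(B)  # odd
--     C = sorted(C)  # even
--
--     MAX = 10 ** 15
--     answer = MAX
--     for i in range(len(A)):
--         j = bisect.bisect_left(B, A[i])
--         answer = min(min(A[i] - B[j-1] if j-1 >= 0 else MAX, B[j] - A[i] if j < len(B) else MAX), answer)
--
--     min_a, ai = MAX, 0
--     for i in range(len(C)):
--         j = bisect.bisect_left(A, C[i])
--         min_a = min(min(C[i] - A[j-1] if j-1 >= 0 else MAX, A[j] - C[i] if j < len(A) else MAX), min_a)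
--         ai = i
--
--     min_b = MAX
--     for i in range(len(C)):
--         if i == ai:
--             continue
--         j = bisect.bisect_left(B, C[i])
--         min_b = min(min(C[i] - B[j-1] if j-1 >= 0 else MAX, B[j] - C[i] if j < len(B) else MAX), min_b)
--
--     answer = min(min_a + min_b, answer)
--
--     A, B = B, A
--
--     min_a, ai = MAX, 0
--     for i in range(len(C)):
--         j = bisect.bisect_left(A, C[i])
--         min_a = min(min(C[i] - A[j-1] if j-1 >= 0 else MAX, A[j] - C[i] if j < len(A) else MAX), min_a)
--         ai = i
--
--     min_b = MAX
--     for i in range(len(C)):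
--         if i == ai:
--             continue
--         j = bisect.bisect_left(B, C[i])
--         min_b = min(min(C[i] - B[j-1] if j-1 >= 0 else MAX, B[j] - C[i] if j < len(B) else MAX), min_b)
--
--     answer = min(min_a + min_b, answer)
--
--     return answer
-- ===== SOURCE B (Python) =====
-- def min_diff(X, Y):
--     # X, Y sorted ascending; minimum |x - y| over all pairs, 10**15 if either is empty
--     best = 10 ** 15
--     i = j = 0
--     while i < len(X) and j < len(Y):
--         d = X[i] - Y[j]
--         best = min(best, -d if d < 0 else d)
--         if X[i] <= Y[j]:
--             i += 1
--         else:
--             j += 1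
--     return best
--
--
-- def f(A, B, C):
--     A, B, C = sorted(A), sorted(B), sorted(C)
--     return min(min_diff(A, B), min_diff(C, A) + min_diff(C, B))
-- ===== Notes on version B (the rewrite author's own statement) =====
-- stated objective: simpler
-- what changed: Replaced the five per-element bisect nearest-neighbour scans by a single two-pointer merge helper min_diff on sorted pairs, and the answer collapses to min(min_diff(A,B), min_diff(C,A)+min_diff(C,B)): the original's skip of one C index is proved never to change the minimum (triangle inequality), so B drops it entirely.
import Mathlib
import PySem

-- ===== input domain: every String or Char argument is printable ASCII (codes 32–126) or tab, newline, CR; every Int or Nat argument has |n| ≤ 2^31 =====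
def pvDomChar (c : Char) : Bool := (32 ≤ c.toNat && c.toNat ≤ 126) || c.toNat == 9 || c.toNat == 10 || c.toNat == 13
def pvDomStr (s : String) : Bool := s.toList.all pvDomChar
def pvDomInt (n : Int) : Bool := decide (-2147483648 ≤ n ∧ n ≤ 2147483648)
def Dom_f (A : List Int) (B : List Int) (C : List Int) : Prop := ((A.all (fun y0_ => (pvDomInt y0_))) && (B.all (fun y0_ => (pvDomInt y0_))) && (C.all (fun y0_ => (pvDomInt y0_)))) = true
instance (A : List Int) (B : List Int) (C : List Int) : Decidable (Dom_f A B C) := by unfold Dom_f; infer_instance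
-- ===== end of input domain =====

-- B replaces A's five per-element bisect nearest-neighbour scans by a two-pointer merge
-- helper applied to two sorted pairs; the proof shows A's extra skipped-index terms never
-- change the minimum (simpler decomposition, same asymptotic cost).

-- ===== PORT A =====
def pvMAX : Int := 1000000000000000

-- the value min(X[i]-Y[j-1] if j-1>=0 else MAX, Y[j]-X[i] if j<len(Y) else MAX) with j = bisect_left(Y, x)
def pvNb (Y : List Int) (x : Int) : Int :=
  let j : Int := (PySem.List.bisectLeft Y x : Int)
  min (if j - 1 ≥ 0 then x - PySem.List.pyGetD Y (j - 1) 0 else pvMAX)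
      (if j < (Y.length : Int) then PySem.List.pyGetD Y j 0 - x else pvMAX)

-- the min_a/ai loop followed by the min_b loop (A's duplicated block, with X,Y the two roles)
def pvCMins (X : List Int) (Y : List Int) (sC : List Int) : Int :=
  let p := (PySem.List.enumerate sC).foldl
      (fun (st : Int × Int) ic => (min (pvNb X ic.2) st.1, ic.1)) (pvMAX, 0)
  let min_b := (PySem.List.enumerate sC).foldl
      (fun acc ic => if ic.1 == p.2 then acc else min (pvNb Y ic.2) acc) pvMAX
  p.1 + min_b

def f (A : List Int) (B : List Int) (C : List Int) : Int :=
  let sA := PySem.List.sorted A (fun v => v)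
  let sB := PySem.List.sorted B (fun v => v)
  let sC := PySem.List.sorted C (fun v => v)
  let answer := sA.foldl (fun acc x => min (pvNb sB x) acc) pvMAX
  let answer := min (pvCMins sA sB sC) answer
  min (pvCMins sB sA sC) answer

-- ===== PORT B =====
-- the two-pointer while loop of Source B's min_diff
def pvMdLoop : List Int → List Int → Int → Int
  | [], _, best => best
  | _ :: _, [], best => best
  | x :: xs, y :: ys, best =>
    let d := x - y
    let best' := min best (if d < 0 then -d else d)
    if x ≤ y then pvMdLoop xs (y :: ys) best' else pvMdLoop (x :: xs) ys best'
termination_by X Y _ => X.length + Y.length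

def pvMd (X : List Int) (Y : List Int) : Int := pvMdLoop X Y pvMAX

def f_alt (A : List Int) (B : List Int) (C : List Int) : Int :=
  let sA := PySem.List.sorted A (fun v => v)
  let sB := PySem.List.sorted B (fun v => v)
  let sC := PySem.List.sorted C (fun v => v)
  min (pvMd sA sB) (pvMd sC sA + pvMd sC sB)

-- ===== PRECONDITION & SPEC =====
def Spec_f (A : List Int) (B : List Int) (C : List Int) (out : Int) : Prop := out = f_alt A B C
instance (A : List Int) (B : List Int) (C : List Int) (out : Int) : Decidable (Spec_f A B C out) := by unfold Spec_f; infer_instance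

-- ===== CLAIM (what is proved, stated in full; the proofs are below) =====
def Claim_equal_f : Prop := ∀ (A : List Int) (B : List Int) (C : List Int), Dom_f A B C → Spec_f A B C (f A B C)

-- ===== LEMMAS AND PROOFS =====

theorem fm_le (l : List Int) : ∀ a : Int, l.foldl min a ≤ a := by
  induction l with
  | nil => intro a; simp
  | cons x t ih =>
    intro a
    simp only [List.foldl_cons]
    exact le_trans (ih _) (min_le_left _ _)

theorem fm_lb (c : Int) (l : List Int) (h : ∀ v ∈ l, c ≤ v) : ∀ a : Int, min a c ≤ l.foldl min a := by
  induction l with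
  | nil => intro a; exact min_le_left _ _
  | cons x t ih =>
    intro a
    simp only [List.foldl_cons]
    have hx : c ≤ x := h x (by simp)
    have : min (min a x) c = min a c := by omega
    calc min a c = min (min a x) c := this.symm
      _ ≤ t.foldl min (min a x) := ih (fun v hv => h v (by simp [hv])) _

theorem fm_le_mem (l : List Int) (v : Int) (hv : v ∈ l) : ∀ a : Int, l.foldl min a ≤ v := by
  induction l with
  | nil => simp at hv
  | cons x t ih =>
    intro a
    simp only [List.foldl_cons]
    rcases List.mem_cons.mp hv with rfl | hv
    · exact le_trans (fm_le _ _) (min_le_right _ _)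
    · exact ih hv _

theorem fm_mem_or (l : List Int) : ∀ a : Int, l.foldl min a = a ∨ l.foldl min a ∈ l := by
  induction l with
  | nil => intro a; simp
  | cons x t ih =>
    intro a
    simp only [List.foldl_cons]
    rcases ih (min a x) with h | h
    · rcases le_or_gt a x with hax | hax
      · left; rw [h]; omega
      · right; rw [h]; simp; left; omega
    · right; simp [h]

theorem fm_min_mem (l : List Int) (a c : Int) (hc : c ∈ l) (h : ∀ v ∈ l, c ≤ v) :
    l.foldl min a = min a c := by
  have h1 := fm_lb c l h a
  have h2 := fm_le_mem l c hc a
  have h3 := fm_le l a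
  omega

theorem pairwise_le_getLast (l : List Int) (h : l.Pairwise (· ≤ ·)) (hne : l ≠ []) :
    ∀ v ∈ l, v ≤ l.getLast hne := by
  induction l with
  | nil => simp at hne
  | cons x t ih =>
    intro v hv
    rcases List.pairwise_cons.mp h with ⟨hx, ht⟩
    cases t with
    | nil => simp at hv; simp [hv]
    | cons y t' =>
      rw [List.getLast_cons (by simp)]
      rcases hv with _ | hv
      · exact hx _ (List.getLast_mem _)
      · exact ih ht (by simp) v (by assumption)

theorem pvNb_eval (Y : List Int) (x : Int) :
    pvNb Y x = min
      (if 1 ≤ PySem.List.bisectLeft Y x then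
        x - PySem.List.pyGetD Y ((PySem.List.bisectLeft Y x : Int) - 1) 0 else pvMAX)
      (if PySem.List.bisectLeft Y x < Y.length then
        PySem.List.pyGetD Y (PySem.List.bisectLeft Y x : Int) 0 - x else pvMAX) := by
  simp only [pvNb]
  congr 1
  · rcases Nat.lt_or_ge (PySem.List.bisectLeft Y x) 1 with h | h
    · rw [if_neg (by omega), if_neg (by omega)]
    · rw [if_pos (by omega), if_pos (by omega)]
  · rcases Nat.lt_or_ge (PySem.List.bisectLeft Y x) Y.length with h | h
    · rw [if_pos (by omega), if_pos h]
    · rw [if_neg (by omega), if_neg (by omega)]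

theorem nb_eq (Y : List Int) (x : Int) (hs : Y.Pairwise (· ≤ ·))
    (hbd : ∀ y ∈ Y, x - y ≤ pvMAX ∧ y - x ≤ pvMAX) :
    pvNb Y x = (Y.map (fun y => |x - y|)).foldl min pvMAX := by
  obtain ⟨hjle, hlt, hge⟩ := PySem.List.bisectLeft_spec Y x hs
  rw [pvNb_eval]
  generalize hj : PySem.List.bisectLeft Y x = j at *
  have hTlen : (Y.take j).length = j := by simp; omega
  have hT : ∀ t ∈ Y.take j, t < x := by
    intro t ht
    obtain ⟨i, hi, rfl⟩ := List.mem_iff_getElem.mp ht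
    rw [List.getElem_take]
    exact hlt i (by omega) (by rw [hTlen] at hi; omega)
  have hD : ∀ d ∈ Y.drop j, x ≤ d := by
    intro d hd
    obtain ⟨i, hi, rfl⟩ := List.mem_iff_getElem.mp hd
    have hi' : j + i < Y.length := by simp at hi; omega
    rw [List.getElem_drop]
    exact hge (j + i) hi' (by omega)
  have hsplit : Y.take j ++ Y.drop j = Y := List.take_append_drop j Y
  conv_rhs => rw [← hsplit]
  rw [List.map_append, List.foldl_append]
  -- evaluate the take-side fold
  have htake : ((Y.take j).map (fun y => |x - y|)).foldl min pvMAX =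
      (if 1 ≤ j then min pvMAX (x - PySem.List.pyGetD Y ((j : Int) - 1) 0) else pvMAX) := by
    rcases Nat.lt_or_ge j 1 with hj0 | hj1
    · have h1 : ¬ (1 ≤ j) := by omega
      have h0 : j = 0 := by omega
      rw [if_neg h1, h0]
      simp
    · rw [if_pos hj1]
      have hTne : Y.take j ≠ [] := by
        intro hnil; rw [hnil] at hTlen; simp at hTlen; omega
      have hlast := pairwise_le_getLast (Y.take j)
        (List.Pairwise.sublist (List.take_sublist _ _) hs) hTne
      have hlmem := List.getLast_mem hTne
      have hmem : |x - (Y.take j).getLast hTne| ∈ (Y.take j).map (fun y => |x - y|) :=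
        List.mem_map.mpr ⟨_, hlmem, rfl⟩
      have hall : ∀ v ∈ (Y.take j).map (fun y => |x - y|), |x - (Y.take j).getLast hTne| ≤ v := by
        intro v hv
        obtain ⟨y, hy, rfl⟩ := List.mem_map.mp hv
        have h1 : y < x := hT y hy
        have h2 : y ≤ (Y.take j).getLast hTne := hlast y hy
        have h3 : (Y.take j).getLast hTne < x := hT _ hlmem
        rw [abs_of_nonneg (by omega), abs_of_nonneg (by omega)]
        omega
      rw [fm_min_mem _ _ _ hmem hall]
      have hlastx : (Y.take j).getLast hTne < x := hT _ hlmem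
      have hYj1 : PySem.List.pyGetD Y ((j:Int) - 1) 0 = (Y.take j).getLast hTne := by
        rw [show ((j:Int) - 1) = ((j-1 : Nat) : Int) by omega, PySem.List.pyGetD_natCast,
          List.getD_eq_getElem _ _ (by omega)]
        rw [List.getLast_eq_getElem]
        simp only [hTlen, List.getElem_take]
      rw [abs_of_nonneg (by omega : (0:Int) ≤ x - (Y.take j).getLast hTne), hYj1]
  rw [htake]
  -- evaluate the drop-side fold
  cases hYD : Y.drop j with
  | nil =>
    have hjlen : j = Y.length := by
      have := congrArg List.length hYD
      simp at this; omega
    simp only [List.map_nil, List.foldl_nil]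
    have hnl : ¬ (j < Y.length) := by omega
    rw [if_neg hnl]
    rcases Nat.lt_or_ge j 1 with hj0 | hj1
    · have h1 : ¬ (1 ≤ j) := by omega
      rw [if_neg h1, if_neg h1]
      simp
    · have h1 : (1:ℕ) ≤ j := hj1
      rw [if_pos h1, if_pos h1]
      exact min_comm _ _
  | cons d ds =>
    have hjlen : j < Y.length := by
      have := congrArg List.length hYD
      simp at this; omega
    have hdmem : d ∈ Y.drop j := by rw [hYD]; simp
    have hxd : x ≤ d := hD d hdmem
    have hds : ∀ v ∈ ds, d ≤ v := by
      intro v hv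
      have hpD : (Y.drop j).Pairwise (· ≤ ·) :=
        List.Pairwise.sublist (List.drop_sublist _ _) hs
      rw [hYD] at hpD
      exact (List.pairwise_cons.mp hpD).1 v hv
    have hmemD : |x - d| ∈ (d :: ds).map (fun y => |x - y|) := by simp
    have hallD : ∀ v ∈ (d :: ds).map (fun y => |x - y|), |x - d| ≤ v := by
      intro v hv
      obtain ⟨y, hy, rfl⟩ := List.mem_map.mp hv
      have hxy : x ≤ y := by
        apply hD; rw [hYD]; exact hy
      have hdy : d ≤ y := by
        rcases List.mem_cons.mp hy with rfl | hy'
        · exact le_refl _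
        · exact hds y hy'
      rw [abs_of_nonpos (by omega), abs_of_nonpos (by omega)]
      omega
    rw [fm_min_mem _ _ _ hmemD hallD]
    have hYj : PySem.List.pyGetD Y (j:Int) 0 = d := by
      rw [PySem.List.pyGetD_natCast, List.getD_eq_getElem _ _ (by omega)]
      have h1 : (List.drop j Y)[0]'(by rw [hYD]; simp) = Y[j + 0]'(by omega) :=
        List.getElem_drop
      simp only [hYD] at h1
      simpa using h1.symm
    rw [if_pos hjlen, hYj, abs_of_nonpos (by omega)]
    have hb := hbd d (List.mem_of_mem_drop hdmem)
    rcases Nat.lt_or_ge j 1 with hj0 | hj1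
    · have h1 : ¬ (1 ≤ j) := by omega
      rw [if_neg h1, if_neg h1]
      omega
    · have h1 : (1:ℕ) ≤ j := hj1
      rw [if_pos h1, if_pos h1]
      omega

def plist (X Y : List Int) : List Int := X.flatMap (fun x => Y.map (fun y => |x - y|))

theorem fm_min (l : List Int) : ∀ (a b : Int), l.foldl min (min a b) = min a (l.foldl min b) := by
  induction l with
  | nil => intro a b; simp
  | cons x t ih =>
    intro a b
    simp only [List.foldl_cons]
    rw [min_assoc, ih]

theorem fm_acc (l : List Int) (a M : Int) (ha : a ≤ M) :
    l.foldl min a = min a (l.foldl min M) := by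
  rw [← fm_min]
  congr 1
  omega

theorem fm_head (e : Int) (es : List Int) (a : Int) (h : ∀ v ∈ es, e ≤ v) :
    (e :: es).foldl min a = min a e := by
  simp only [List.foldl_cons]
  have h1 := fm_lb e es h (min a e)
  have h2 := fm_le es (min a e)
  omega

theorem plist_nil_right (X : List Int) : plist X [] = [] := by
  induction X <;> simp_all [plist]

theorem plist_cons (x : Int) (xs Y : List Int) :
    plist (x :: xs) Y = Y.map (fun y => |x - y|) ++ plist xs Y := by
  simp [plist]

theorem mem_plist {X Y : List Int} {e : Int} :
    e ∈ plist X Y ↔ ∃ x ∈ X, ∃ y ∈ Y, e = |x - y| := by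
  simp [plist, List.mem_flatMap, List.mem_map, eq_comm]

theorem loop_eq (Y : List Int) (hs : Y.Pairwise (· ≤ ·)) :
    ∀ (X : List Int) (a : Int), a ≤ pvMAX →
      (∀ x ∈ X, ∀ y ∈ Y, x - y ≤ pvMAX ∧ y - x ≤ pvMAX) →
      X.foldl (fun acc x => min (pvNb Y x) acc) a = (plist X Y).foldl min a := by
  intro X
  induction X with
  | nil => intro a _ _; simp [plist]
  | cons x xs ih =>
    intro a ha hbd
    simp only [List.foldl_cons]
    rw [plist_cons, List.foldl_append]
    have hrow : (Y.map (fun y => |x - y|)).foldl min a = min (pvNb Y x) a := by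
      rw [fm_acc _ a pvMAX ha, ← nb_eq Y x hs (hbd x (by simp)), min_comm]
    rw [hrow]
    exact ih _ (by have := min_le_right (pvNb Y x) a; omega)
      (fun x' hx' => hbd x' (by simp [hx']))

theorem col (y v : Int) (ys : List Int) :
    ∀ (X : List Int) (a : Int), a ≤ v → (∀ x' ∈ X, v ≤ |x' - y|) →
      (plist X (y :: ys)).foldl min a = (plist X ys).foldl min a := by
  intro X
  induction X with
  | nil => intro a _ _; simp [plist]
  | cons x' X' ih =>
    intro a ha hall
    rw [plist_cons, plist_cons, List.foldl_append, List.foldl_append]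
    simp only [List.map_cons, List.foldl_cons]
    have hax : min a |x' - y| = a := by
      have := hall x' (by simp); omega
    rw [hax]
    exact ih _ (le_trans (fm_le _ _) ha) (fun z hz => hall z (by simp [hz]))

theorem md_eq : ∀ (n : Nat) (X Y : List Int), X.length + Y.length ≤ n →
    X.Pairwise (· ≤ ·) → Y.Pairwise (· ≤ ·) →
    ∀ a : Int, pvMdLoop X Y a = (plist X Y).foldl min a := by
  intro n
  induction n with
  | zero =>
    intro X Y hlen _ _ a
    have hX : X = [] := by cases X <;> simp_all
    simp [hX, pvMdLoop, plist]
  | succ n ih =>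
    intro X Y hlen hX hY a
    cases X with
    | nil => simp [pvMdLoop, plist]
    | cons x xs =>
      cases Y with
      | nil => simp [pvMdLoop, plist_nil_right]
      | cons y ys =>
        simp only [pvMdLoop]
        by_cases hxy : x ≤ y
        · rw [if_pos hxy]
          have hd : (if x - y < 0 then -(x - y) else x - y) = y - x := by
            split_ifs <;> omega
          rw [hd]
          rw [plist_cons, List.foldl_append, List.map_cons]
          have hrow : ((|x - y| :: ys.map (fun y' => |x - y'|)).foldl min a) = min a (y - x) := by
            have habs : |x - y| = y - x := by rw [abs_of_nonpos (by omega)]; ring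
            rw [fm_head _ _ _ ?_, habs]
            intro v hv
            obtain ⟨y', hy', rfl⟩ := List.mem_map.mp hv
            have : y ≤ y' := (List.pairwise_cons.mp hY).1 y' hy'
            rw [habs, abs_of_nonpos (by omega)]
            omega
          rw [hrow]
          exact ih xs (y :: ys) (by simp at hlen ⊢; omega)
            (List.pairwise_cons.mp hX).2 hY _
        · rw [if_neg hxy]
          have hd : (if x - y < 0 then -(x - y) else x - y) = x - y := by
            split_ifs <;> omega
          rw [hd]
          rw [plist_cons, List.foldl_append, List.map_cons]
          simp only [List.foldl_cons]
          have habs : |x - y| = x - y := abs_of_nonneg (by omega)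
          rw [habs]
          have hcol := col y (x - y) ys xs
            ((ys.map (fun y' => |x - y'|)).foldl min (min a (x - y)))
            (le_trans (fm_le _ _) (min_le_right _ _))
            (fun x' hx' => by
              have hxx' : x ≤ x' := (List.pairwise_cons.mp hX).1 x' hx'
              rw [abs_of_nonneg (by omega)]
              omega)
          rw [hcol]
          have hrhs : (plist (x :: xs) ys).foldl min (min a (x - y)) =
              (plist xs ys).foldl min ((ys.map (fun y' => |x - y'|)).foldl min (min a (x - y))) := by
            rw [plist_cons, List.foldl_append]
          rw [ih (x :: xs) ys (by simp at hlen ⊢; omega) hX (List.pairwise_cons.mp hY).2]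
          rw [hrhs]

theorem e1 (X : List Int) :
    ∀ (l : List Int) (s a i0 : Int),
      (PySem.List.enumerate l s).foldl
        (fun (st : Int × Int) ic => (min (pvNb X ic.2) st.1, ic.1)) (a, i0)
      = (l.foldl (fun acc c => min (pvNb X c) acc) a,
         if l.isEmpty then i0 else s + l.length - 1) := by
  intro l
  induction l with
  | nil => intro s a i0; simp [PySem.List.enumerate]
  | cons c cs ih =>
    intro s a i0
    rw [PySem.List.enumerate_cons]
    simp only [List.foldl_cons]
    rw [ih]
    cases cs with
    | nil => simp
    | cons c' cs' =>
      simp only [List.isEmpty_cons, List.length_cons]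
      push_cast
      have : s + 1 + ((cs'.length : Int) + 1) - 1 = s + ((cs'.length : Int) + 1 + 1) - 1 := by ring
      rw [this]

theorem e3 (Y : List Int) (t : Int) :
    ∀ (l : List Int) (s a : Int),
      (∀ k : Nat, k < l.length → s + k ≠ t) →
      (PySem.List.enumerate l s).foldl
        (fun acc ic => if ic.1 == t then acc else min (pvNb Y ic.2) acc) a
      = l.foldl (fun acc c => min (pvNb Y c) acc) a := by
  intro l
  induction l with
  | nil => intro s a _; simp [PySem.List.enumerate]
  | cons c cs ih =>
    intro s a h
    rw [PySem.List.enumerate_cons]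
    simp only [List.foldl_cons]
    have hs : s ≠ t := by have := h 0 (by simp); simpa using this
    rw [if_neg (by simpa using hs)]
    exact ih _ _ (fun k hk => by
      have := h (k + 1) (by simp; omega)
      push_cast at this ⊢
      omega)

theorem cmins_eq (X Y sC : List Int)
    (hX : X.Pairwise (· ≤ ·)) (hY : Y.Pairwise (· ≤ ·))
    (hbdX : ∀ c ∈ sC, ∀ x ∈ X, c - x ≤ pvMAX ∧ x - c ≤ pvMAX)
    (hbdY : ∀ c ∈ sC, ∀ y ∈ Y, c - y ≤ pvMAX ∧ y - c ≤ pvMAX) :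
    pvCMins X Y sC = (plist sC X).foldl min pvMAX + (plist sC.dropLast Y).foldl min pvMAX := by
  simp only [pvCMins]
  rw [e1 X sC 0 pvMAX 0]
  by_cases hne : sC = []
  · subst hne
    simp [plist, PySem.List.enumerate]
  · have hsplit := List.dropLast_append_getLast hne
    have hlen : sC.dropLast.length = sC.length - 1 := by simp
    have hlen1 : 1 ≤ sC.length := by
      cases sC
      · simp at hne
      · simp
    have hempty : sC.isEmpty = false := by simp [hne]
    rw [hempty]
    simp only [Bool.false_eq_true, if_false]
    rw [loop_eq X hX sC pvMAX le_rfl hbdX]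
    congr 1
    -- the min_b fold skips exactly the last index
    conv_lhs => rw [← hsplit]
    rw [PySem.List.enumerate_append, List.foldl_append]
    rw [e3 Y _ sC.dropLast 0 pvMAX (fun k hk => by
      rw [hlen] at hk
      simp only [List.length_append, List.length_cons, List.length_nil]
      push_cast
      omega)]
    rw [PySem.List.enumerate_cons]
    simp only [PySem.List.enumerate_nil, List.foldl_cons, List.foldl_nil]
    rw [if_pos (by
      rw [beq_iff_eq]
      simp only [List.length_append, List.length_cons, List.length_nil, hlen]
      push_cast
      omega)]
    exact loop_eq Y hY sC.dropLast pvMAX le_rfl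
      (fun c hc => hbdY c (List.mem_of_mem_dropLast hc))

theorem mkbd (P Q : List Int)
    (hP : ∀ v ∈ P, -2147483648 ≤ v ∧ v ≤ 2147483648)
    (hQ : ∀ v ∈ Q, -2147483648 ≤ v ∧ v ≤ 2147483648) :
    ∀ x ∈ P, ∀ y ∈ Q, x - y ≤ pvMAX ∧ y - x ≤ pvMAX := by
  intro x hx y hy
  have h1 := hP x hx
  have h2 := hQ y hy
  rw [show pvMAX = 1000000000000000 from rfl]
  omega

theorem plist_drop_sub (Cl Z : List Int) (e : Int) (he : e ∈ plist Cl.dropLast Z) :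
    e ∈ plist Cl Z := by
  obtain ⟨c, hc, z, hz, rfl⟩ := mem_plist.mp he
  exact mem_plist.mpr ⟨c, List.mem_of_mem_dropLast hc, z, hz, rfl⟩

theorem fm_drop_ge (Cl Z : List Int) :
    (plist Cl Z).foldl min pvMAX ≤ (plist Cl.dropLast Z).foldl min pvMAX := by
  rcases fm_mem_or (plist Cl.dropLast Z) pvMAX with h | h
  · rw [h]; exact fm_le _ _
  · exact fm_le_mem _ _ (plist_drop_sub Cl Z _ h) _

-- A's skipped-index terms never change the minimum: if the nearest partner of C in X (or Y)
-- is only achieved at C's last element on BOTH sides, the triangle inequality makes the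
-- cross sum at least the direct X-Y minimum.
theorem key (X Y Cl : List Int) :
    min ((plist Cl Y).foldl min pvMAX + (plist Cl.dropLast X).foldl min pvMAX)
      (min ((plist Cl X).foldl min pvMAX + (plist Cl.dropLast Y).foldl min pvMAX)
        ((plist X Y).foldl min pvMAX))
    = min ((plist X Y).foldl min pvMAX)
        ((plist Cl X).foldl min pvMAX + (plist Cl Y).foldl min pvMAX) := by
  set mAB := (plist X Y).foldl min pvMAX with hmAB
  set mCX := (plist Cl X).foldl min pvMAX with hmCX
  set mCY := (plist Cl Y).foldl min pvMAX with hmCY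
  set mX' := (plist Cl.dropLast X).foldl min pvMAX with hmX'
  set mY' := (plist Cl.dropLast Y).foldl min pvMAX with hmY'
  have h1 : mCX ≤ mX' := fm_drop_ge Cl X
  have h2 : mCY ≤ mY' := fm_drop_ge Cl Y
  by_cases hy : mY' ≤ mCY
  · omega
  · by_cases hx : mX' ≤ mCX
    · omega
    · simp only [not_le] at hx hy
      -- mCY achieved only at Cl's last element
      have hyM : mCY ∈ plist Cl Y := by
        rcases fm_mem_or (plist Cl Y) pvMAX with h | h
        · exfalso
          have := fm_le (plist Cl.dropLast Y) pvMAX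
          rw [← hmY'] at this
          omega
        · exact h
      have hxM : mCX ∈ plist Cl X := by
        rcases fm_mem_or (plist Cl X) pvMAX with h | h
        · exfalso
          have := fm_le (plist Cl.dropLast X) pvMAX
          rw [← hmX'] at this
          omega
        · exact h
      obtain ⟨cy, hcy, y0, hy0, hyv⟩ := mem_plist.mp hyM
      obtain ⟨cx, hcx, x0, hx0, hxv⟩ := mem_plist.mp hxM
      have hCne : Cl ≠ [] := by rintro rfl; simp at hcy
      have hcy' : cy ∉ Cl.dropLast := by
        intro hmem
        have : mY' ≤ mCY :=
          fm_le_mem _ _ (mem_plist.mpr ⟨cy, hmem, y0, hy0, hyv⟩) _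
        omega
      have hcx' : cx ∉ Cl.dropLast := by
        intro hmem
        have : mX' ≤ mCX :=
          fm_le_mem _ _ (mem_plist.mpr ⟨cx, hmem, x0, hx0, hxv⟩) _
        omega
      -- both witnesses are Cl's last element, hence equal
      have hlast : ∀ c : Int, c ∈ Cl → c ∉ Cl.dropLast → c = Cl.getLast hCne := by
        intro c hc hc'
        have := List.dropLast_append_getLast hCne
        rw [← this] at hc
        rcases List.mem_append.mp hc with h | h
        · exact absurd h hc'
        · simpa using h
      have hcyl := hlast cy hcy hcy'
      have hcxl := hlast cx hcx hcx'
      have hceq : cy = cx := by rw [hcyl, hcxl]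
      -- triangle: mCX + mCY ≥ |x0 - y0| ≥ mAB
      have htri : |x0 - y0| ≤ mCX + mCY := by
        rw [hxv, hyv, hceq]
        calc |x0 - y0| = |(x0 - cx) + (cx - y0)| := by ring_nf
          _ ≤ |x0 - cx| + |cx - y0| := abs_add_le _ _
          _ = |cx - x0| + |cx - y0| := by rw [abs_sub_comm]
      have hAB : mAB ≤ |x0 - y0| :=
        fm_le_mem _ _ (mem_plist.mpr ⟨x0, hx0, y0, hy0, rfl⟩) _
      omega

-- ===== VERDICT (by name: the statement is the Claim_ definition above) =====
theorem f_spec : Claim_equal_f := by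
  unfold Claim_equal_f
  intro A B C hD
  unfold Spec_f
  unfold Dom_f at hD
  simp only [Bool.and_eq_true] at hD
  obtain ⟨⟨hA, hB⟩, hC⟩ := hD
  have hb : ∀ (L : List Int), (L.all fun v => pvDomInt v) = true →
      ∀ v ∈ PySem.List.sorted L (fun v => v), -2147483648 ≤ v ∧ v ≤ 2147483648 := by
    intro L hL v hv
    have hvL : v ∈ L := (PySem.List.mem_sorted L (fun v => v) false v).mp hv
    have := List.all_eq_true.mp hL v hvL
    simpa [pvDomInt] using this
  have bA := hb A hA
  have bB := hb B hB
  have bC := hb C hC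
  have pA : (PySem.List.sorted A (fun v => v)).Pairwise (· ≤ ·) := by
    simpa using PySem.List.sorted_pairwise A (fun v => v)
  have pB : (PySem.List.sorted B (fun v => v)).Pairwise (· ≤ ·) := by
    simpa using PySem.List.sorted_pairwise B (fun v => v)
  have pC : (PySem.List.sorted C (fun v => v)).Pairwise (· ≤ ·) := by
    simpa using PySem.List.sorted_pairwise C (fun v => v)
  simp only [f, f_alt, pvMd]
  rw [loop_eq _ pB _ pvMAX le_rfl (mkbd _ _ bA bB)]
  rw [cmins_eq _ _ _ pA pB (mkbd _ _ bC bA) (mkbd _ _ bC bB)]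
  rw [cmins_eq _ _ _ pB pA (mkbd _ _ bC bB) (mkbd _ _ bC bA)]
  rw [md_eq _ _ _ le_rfl pA pB, md_eq _ _ _ le_rfl pC pA, md_eq _ _ _ le_rfl pC pB]
  exact key _ _ _
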